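-- pv_equiv track=rewrite | github.com/foreverxujiahuan/algorithm | 数组/lc6160.py | f
-- ===== SOURCE A (Python) =====
-- def f(arr, n):
--     length = len(arr)
--     ans = 0
--     for i in range(length):
--         for j in range(i+1, length):
--             if arr[i] + arr[j] <= n and j-i+1 > ans:
--                 ans = j-i+1
--     return ans
-- ===== SOURCE B (Python) =====
-- def _bs(pmin, t, lo, hi):
--     # least index in [lo, hi] with pmin[idx] <= t, assuming pmin[hi] <= t
--     while lo < hi:
--         mid = (lo + hi) // 2
--         if pmin[mid] <= t:
--             hi = mid
--         else:
--             lo = mid + 1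
--     return lo
--
--
-- def f(arr, n):
--     if not arr:
--         return 0
--     pmin = [arr[0]]
--     for x in arr[1:]:
--         pmin.append(min(pmin[-1], x))
--     ans = 0
--     for j in range(1, len(arr)):
--         t = n - arr[j]
--         if pmin[j - 1] <= t:
--             lo = _bs(pmin, t, 0, j - 1)
--             if j - lo + 1 > ans:
--                 ans = j - lo + 1
--     return ans
-- ===== Notes on version B (the rewrite author's own statement) =====
-- stated objective: faster
-- what changed: Replaces A's all-pairs double loop by a prefix-minimum array plus a per-j binary search for the earliest index i with arr[i] <= n - arr[j].
import Mathlib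
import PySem

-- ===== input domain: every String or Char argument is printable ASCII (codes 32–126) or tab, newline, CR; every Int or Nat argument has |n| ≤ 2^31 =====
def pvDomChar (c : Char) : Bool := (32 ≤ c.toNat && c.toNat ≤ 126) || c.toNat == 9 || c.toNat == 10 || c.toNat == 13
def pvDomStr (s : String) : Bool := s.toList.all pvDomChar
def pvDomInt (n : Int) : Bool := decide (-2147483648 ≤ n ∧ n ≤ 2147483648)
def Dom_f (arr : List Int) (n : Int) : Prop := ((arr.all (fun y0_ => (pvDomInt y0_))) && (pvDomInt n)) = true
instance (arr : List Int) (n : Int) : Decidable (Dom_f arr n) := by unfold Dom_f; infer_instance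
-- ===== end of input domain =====

-- B replaces A's quadratic all-pairs scan by a prefix-minimum array plus a per-j binary
-- search for the earliest usable left index (objective: faster, O(n log n) vs O(n^2)).

-- ===== PORT A =====
def f (arr : List Int) (n : Int) : Int :=
  let length := arr.length
  (List.range length).foldl
    (fun ans i =>
      (List.range' (i+1) (length - (i+1))).foldl
        (fun ans j =>
          if arr.getD i 0 + arr.getD j 0 ≤ n ∧ (j : Int) - (i : Int) + 1 > ans
          then (j : Int) - (i : Int) + 1 else ans)
        ans)
    0

-- ===== PORT B =====
-- running prefix minima: pvMins a rest = [min of arr[0..k]]_{k}  for arr = a :: rest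
def pvMins (c : Int) : List Int → List Int
  | [] => [c]
  | x :: xs => c :: pvMins (min c x) xs

-- Source B's `_bs` while-loop: least index in [lo,hi] with pmin[idx] ≤ t (pmin antitone, pmin[hi] ≤ t)
def pvBS (pmin : List Int) (t : Int) (lo hi : Nat) : Nat :=
  if _h : lo < hi then
    if pmin.getD ((lo + hi) / 2) 0 ≤ t then pvBS pmin t lo ((lo + hi) / 2)
    else pvBS pmin t ((lo + hi) / 2 + 1) hi
  else lo
termination_by hi - lo
decreasing_by all_goals omega

def f_alt (arr : List Int) (n : Int) : Int :=
  match arr with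
  | [] => 0
  | a :: rest =>
    let pmin := pvMins a rest
    (List.range' 1 rest.length).foldl
      (fun ans j =>
        let t := n - (a :: rest).getD j 0
        if pmin.getD (j-1) 0 ≤ t then
          let lo := pvBS pmin t 0 (j-1)
          if (j : Int) - (lo : Int) + 1 > ans then (j : Int) - (lo : Int) + 1 else ans
        else ans)
      0

-- ===== PRECONDITION & SPEC =====
def Spec_f (arr : List Int) (n : Int) (out : Int) : Prop := out = f_alt arr n
instance (arr : List Int) (n : Int) (out : Int) : Decidable (Spec_f arr n out) := by unfold Spec_f; infer_instance

-- ===== CLAIM (what is proved, stated in full; the proofs are below) =====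
def Claim_equal_f : Prop := ∀ (arr : List Int) (n : Int), Dom_f arr n → Spec_f arr n (f arr n)

-- ===== LEMMAS AND PROOFS =====

/-- a qualifying pair of indices -/
def pvGood (arr : List Int) (n : Int) (i j : Nat) : Prop :=
  i < j ∧ j < arr.length ∧ arr.getD i 0 + arr.getD j 0 ≤ n

/-- the span a pair contributes -/
def pvSp (i j : Nat) : Int := (j : Int) - (i : Int) + 1

/-- v is the answer: max of 0 and all qualifying spans -/
def pvIsMax (arr : List Int) (n : Int) (v : Int) : Prop :=
  0 ≤ v ∧ (v = 0 ∨ ∃ i j, pvGood arr n i j ∧ v = pvSp i j) ∧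
    ∀ i j, pvGood arr n i j → pvSp i j ≤ v

theorem pvIsMax_unique (arr : List Int) (n : Int) (v w : Int)
    (hv : pvIsMax arr n v) (hw : pvIsMax arr n w) : v = w := by
  obtain ⟨hv0, hvatt, hvub⟩ := hv
  obtain ⟨hw0, hwatt, hwub⟩ := hw
  have h1 : v ≤ w := by
    rcases hvatt with h | ⟨i, j, hg, he⟩
    · omega
    · exact he ▸ hwub i j hg
  have h2 : w ≤ v := by
    rcases hwatt with h | ⟨i, j, hg, he⟩
    · omega
    · exact he ▸ hvub i j hg
  omega

-- ---------- A side ----------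

theorem foldA_spec (arr : List Int) (n : Int) (i : Nat) :
    ∀ (l : List Nat) (a : Int),
      a ≤ l.foldl (fun ans j =>
          if arr.getD i 0 + arr.getD j 0 ≤ n ∧ (j : Int) - (i : Int) + 1 > ans
          then (j : Int) - (i : Int) + 1 else ans) a ∧
      (l.foldl (fun ans j =>
          if arr.getD i 0 + arr.getD j 0 ≤ n ∧ (j : Int) - (i : Int) + 1 > ans
          then (j : Int) - (i : Int) + 1 else ans) a = a ∨
        ∃ j ∈ l, arr.getD i 0 + arr.getD j 0 ≤ n ∧
          l.foldl (fun ans j =>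
            if arr.getD i 0 + arr.getD j 0 ≤ n ∧ (j : Int) - (i : Int) + 1 > ans
            then (j : Int) - (i : Int) + 1 else ans) a = pvSp i j) ∧
      ∀ j ∈ l, arr.getD i 0 + arr.getD j 0 ≤ n →
        pvSp i j ≤ l.foldl (fun ans j =>
          if arr.getD i 0 + arr.getD j 0 ≤ n ∧ (j : Int) - (i : Int) + 1 > ans
          then (j : Int) - (i : Int) + 1 else ans) a := by
  intro l
  induction l with
  | nil => intro a; exact ⟨le_refl _, Or.inl rfl, by simp⟩
  | cons x l ih =>
    intro a
    simp only [List.foldl_cons]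
    by_cases hc : arr.getD i 0 + arr.getD x 0 ≤ n ∧ (x : Int) - (i : Int) + 1 > a
    · obtain ⟨h1, h2, h3⟩ := ih ((x : Int) - (i : Int) + 1)
      simp only [if_pos hc]
      refine ⟨le_trans (le_of_lt hc.2) h1, ?_, ?_⟩
      · rcases h2 with h | ⟨j, hj, hcj, he⟩
        · exact Or.inr ⟨x, List.mem_cons_self, hc.1, by rw [h]; rfl⟩
        · exact Or.inr ⟨j, List.mem_cons_of_mem _ hj, hcj, he⟩
      · intro j hj hcj
        rcases List.mem_cons.mp hj with rfl | hj
        · simpa [pvSp] using h1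
        · exact h3 j hj hcj
    · obtain ⟨h1, h2, h3⟩ := ih a
      simp only [if_neg hc]
      refine ⟨h1, ?_, ?_⟩
      · rcases h2 with h | ⟨j, hj, hcj, he⟩
        · exact Or.inl h
        · exact Or.inr ⟨j, List.mem_cons_of_mem _ hj, hcj, he⟩
      · intro j hj hcj
        rcases List.mem_cons.mp hj with rfl | hj
        · have hle : (j : Int) - (i : Int) + 1 ≤ a := by
            by_contra hlt
            exact hc ⟨hcj, by omega⟩
          calc pvSp i j ≤ a := by simpa [pvSp] using hle
            _ ≤ _ := h1
        · exact h3 j hj hcj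

theorem foldA_outer (arr : List Int) (n : Int) :
    ∀ (L : List Nat) (a : Int), (∀ i ∈ L, i < arr.length) →
      a ≤ L.foldl (fun ans i =>
          (List.range' (i+1) (arr.length - (i+1))).foldl (fun ans j =>
            if arr.getD i 0 + arr.getD j 0 ≤ n ∧ (j : Int) - (i : Int) + 1 > ans
            then (j : Int) - (i : Int) + 1 else ans) ans) a ∧
      (L.foldl (fun ans i =>
          (List.range' (i+1) (arr.length - (i+1))).foldl (fun ans j =>
            if arr.getD i 0 + arr.getD j 0 ≤ n ∧ (j : Int) - (i : Int) + 1 > ans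
            then (j : Int) - (i : Int) + 1 else ans) ans) a = a ∨
        ∃ i j, pvGood arr n i j ∧
          L.foldl (fun ans i =>
            (List.range' (i+1) (arr.length - (i+1))).foldl (fun ans j =>
              if arr.getD i 0 + arr.getD j 0 ≤ n ∧ (j : Int) - (i : Int) + 1 > ans
              then (j : Int) - (i : Int) + 1 else ans) ans) a = pvSp i j) ∧
      ∀ i ∈ L, ∀ j, pvGood arr n i j →
        pvSp i j ≤ L.foldl (fun ans i =>
          (List.range' (i+1) (arr.length - (i+1))).foldl (fun ans j =>
            if arr.getD i 0 + arr.getD j 0 ≤ n ∧ (j : Int) - (i : Int) + 1 > ans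
            then (j : Int) - (i : Int) + 1 else ans) ans) a := by
  intro L
  induction L with
  | nil => intro a _; exact ⟨le_refl _, Or.inl rfl, by simp⟩
  | cons x L ih =>
    intro a hmem
    have hx : x < arr.length := hmem x List.mem_cons_self
    simp only [List.foldl_cons]
    obtain ⟨g1, g2, g3⟩ := foldA_spec arr n x (List.range' (x+1) (arr.length - (x+1))) a
    obtain ⟨h1, h2, h3⟩ := ih ((List.range' (x+1) (arr.length - (x+1))).foldl (fun ans j =>
      if arr.getD x 0 + arr.getD j 0 ≤ n ∧ (j : Int) - (x : Int) + 1 > ans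
      then (j : Int) - (x : Int) + 1 else ans) a) (fun i hi => hmem i (List.mem_cons_of_mem _ hi))
    refine ⟨le_trans g1 h1, ?_, ?_⟩
    · rcases h2 with h | ⟨i, j, hg, he⟩
      · rw [h]
        rcases g2 with g | ⟨j, hj, hcj, ge⟩
        · exact Or.inl g
        · have hj' := List.mem_range'_1.mp hj
          exact Or.inr ⟨x, j, ⟨by omega, by omega, hcj⟩, ge⟩
      · exact Or.inr ⟨i, j, hg, he⟩
    · intro i hi j hg
      rcases List.mem_cons.mp hi with rfl | hi
      · have hj : j ∈ List.range' (i+1) (arr.length - (i+1)) := by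
          apply List.mem_range'_1.mpr
          obtain ⟨hij, hjl, _⟩ := hg
          omega
        exact le_trans (g3 j hj hg.2.2) h1
      · exact h3 i hi j hg

theorem f_isMax (arr : List Int) (n : Int) : pvIsMax arr n (f arr n) := by
  obtain ⟨h1, h2, h3⟩ := foldA_outer arr n (List.range arr.length) 0
    (fun i hi => List.mem_range.mp hi)
  refine ⟨h1, ?_, ?_⟩
  · rcases h2 with h | ⟨i, j, hg, he⟩
    · exact Or.inl h
    · exact Or.inr ⟨i, j, hg, he⟩
  · intro i j hg
    exact h3 i (List.mem_range.mpr (by obtain ⟨h4, h5, _⟩ := hg; omega)) j hg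

-- ---------- B side: prefix minima ----------

theorem pvMins_le (l : List Int) (c : Int) (k i : Nat) (hk : k ≤ l.length) (hi : i ≤ k) :
    (pvMins c l).getD k 0 ≤ (c :: l).getD i 0 := by
  induction l generalizing c k i with
  | nil =>
    obtain rfl : k = 0 := by simp at hk; omega
    obtain rfl : i = 0 := by omega
    simp [pvMins]
  | cons x xs ih =>
    cases k with
    | zero =>
      obtain rfl : i = 0 := by omega
      simp [pvMins]
    | succ k' =>
      cases i with
      | zero =>
        have h := ih (min c x) k' 0 (by simpa using hk) (Nat.zero_le _)
        simp only [pvMins, List.getD_cons_succ, List.getD_cons_zero] at h ⊢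
        exact le_trans h (min_le_left _ _)
      | succ i' =>
        cases i' with
        | zero =>
          have h := ih (min c x) k' 0 (by simpa using hk) (Nat.zero_le _)
          simp only [pvMins, List.getD_cons_succ, List.getD_cons_zero] at h ⊢
          exact le_trans h (min_le_right _ _)
        | succ m =>
          have h := ih (min c x) k' (m+1) (by simpa using hk) (by omega)
          simpa [pvMins] using h

theorem pvMins_mem (l : List Int) (c : Int) (k : Nat) (hk : k ≤ l.length) :
    ∃ i ≤ k, (pvMins c l).getD k 0 = (c :: l).getD i 0 := by
  induction l generalizing c k with
  | nil =>
    obtain rfl : k = 0 := by simp at hk; omega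
    exact ⟨0, le_refl _, by simp [pvMins]⟩
  | cons x xs ih =>
    cases k with
    | zero => exact ⟨0, le_refl _, by simp [pvMins]⟩
    | succ k' =>
      obtain ⟨i, hi, he⟩ := ih (min c x) k' (by simpa using hk)
      have hgd : (pvMins c (x :: xs)).getD (k' + 1) 0 = (pvMins (min c x) xs).getD k' 0 := by
        simp [pvMins]
      cases i with
      | zero =>
        simp only [List.getD_cons_zero] at he
        rcases le_total c x with h | h
        · refine ⟨0, by omega, ?_⟩
          rw [hgd, he, min_eq_left h]; simp
        · refine ⟨1, by omega, ?_⟩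
          rw [hgd, he, min_eq_right h]; simp
      | succ m =>
        refine ⟨m + 2, by omega, ?_⟩
        rw [hgd, he]; simp

theorem pvMins_anti (l : List Int) (c : Int) (k k' : Nat) (h1 : k ≤ k') (h2 : k' ≤ l.length) :
    (pvMins c l).getD k' 0 ≤ (pvMins c l).getD k 0 := by
  obtain ⟨i, hi, he⟩ := pvMins_mem l c k (le_trans h1 h2)
  rw [he]
  exact pvMins_le l c k' i h2 (le_trans hi h1)

-- ---------- B side: binary search ----------

theorem pvBS_spec (pmin : List Int) (t : Int) :
    ∀ d lo hi, hi - lo = d → lo ≤ hi → pmin.getD hi 0 ≤ t →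
      (∀ a b, a ≤ b → b ≤ hi → pmin.getD a 0 ≤ t → pmin.getD b 0 ≤ t) →
      (∀ k < lo, ¬ pmin.getD k 0 ≤ t) →
      lo ≤ pvBS pmin t lo hi ∧ pvBS pmin t lo hi ≤ hi ∧
        pmin.getD (pvBS pmin t lo hi) 0 ≤ t ∧
        ∀ k < pvBS pmin t lo hi, ¬ pmin.getD k 0 ≤ t := by
  intro d
  induction d using Nat.strong_induction_on with
  | _ d ih =>
    intro lo hi hd hle hPhi hmono hlo
    rw [pvBS]
    by_cases h : lo < hi
    · rw [dif_pos h]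
      by_cases hp : pmin.getD ((lo + hi) / 2) 0 ≤ t
      · rw [if_pos hp]
        have := ih ((lo + hi) / 2 - lo) (by omega) lo ((lo + hi) / 2) rfl (by omega) hp
          (fun a b hab hb ha => hmono a b hab (by omega) ha) hlo
        exact ⟨this.1, by omega, this.2.2.1, this.2.2.2⟩
      · rw [if_neg hp]
        have hlo' : ∀ k < (lo + hi) / 2 + 1, ¬ pmin.getD k 0 ≤ t := by
          intro k hk hPk
          by_cases hk' : k < lo
          · exact hlo k hk' hPk
          · exact hp (hmono k ((lo + hi) / 2) (by omega) (by omega) hPk)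
        have := ih (hi - ((lo + hi) / 2 + 1)) (by omega) ((lo + hi) / 2 + 1) hi rfl (by omega)
          hPhi hmono hlo'
        exact ⟨by omega, this.2.1, this.2.2.1, this.2.2.2⟩
    · rw [dif_neg h]
      obtain rfl : lo = hi := by omega
      exact ⟨le_refl _, le_refl _, hPhi, hlo⟩

/-- at a j whose guard holds, the binary-search index is the best (smallest) partner -/
theorem pvAtJ (a : Int) (rest : List Int) (n : Int) (j : Nat)
    (hj1 : 1 ≤ j) (hjl : j < (a :: rest).length)
    (hg : (pvMins a rest).getD (j-1) 0 ≤ n - (a :: rest).getD j 0) :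
    pvGood (a :: rest) n (pvBS (pvMins a rest) (n - (a :: rest).getD j 0) 0 (j-1)) j ∧
      ∀ i, pvGood (a :: rest) n i j →
        pvBS (pvMins a rest) (n - (a :: rest).getD j 0) 0 (j-1) ≤ i := by
  have hjr : j ≤ rest.length := by simpa using Nat.lt_succ_iff.mp (by simpa using hjl)
  have hmono : ∀ x y, x ≤ y → y ≤ j - 1 →
      (pvMins a rest).getD x 0 ≤ n - (a :: rest).getD j 0 →
      (pvMins a rest).getD y 0 ≤ n - (a :: rest).getD j 0 := by
    intro x y hxy hy hx
    exact le_trans (pvMins_anti rest a x y hxy (by omega)) hx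
  obtain ⟨h1, h2, h3, h4⟩ := pvBS_spec (pvMins a rest) (n - (a :: rest).getD j 0)
    (j - 1 - 0) 0 (j-1) rfl (Nat.zero_le _) hg hmono (by omega)
  set lo := pvBS (pvMins a rest) (n - (a :: rest).getD j 0) 0 (j-1) with hlodef
  have hav : (a :: rest).getD lo 0 ≤ n - (a :: rest).getD j 0 := by
    obtain ⟨i, hi, he⟩ := pvMins_mem rest a lo (by omega)
    have : i = lo := by
      by_contra hne
      have hilt : i < lo := by omega
      exact h4 i hilt (le_trans (pvMins_le rest a i i (by omega) (le_refl _)) (he ▸ h3))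
    rw [← this, ← he]
    exact h3
  constructor
  · exact ⟨by omega, hjl, by omega⟩
  · intro i hgi
    obtain ⟨hij, _, hsum⟩ := hgi
    have hPi : (pvMins a rest).getD i 0 ≤ n - (a :: rest).getD j 0 :=
      le_trans (pvMins_le rest a i i (by omega) (le_refl _)) (by omega)
    by_contra hlt
    exact h4 i (by omega) hPi

/-- when the guard fails at j, j has no partner at all -/
theorem pvNoPair (a : Int) (rest : List Int) (n : Int) (j : Nat)
    (hjl : j < (a :: rest).length)
    (hg : ¬ (pvMins a rest).getD (j-1) 0 ≤ n - (a :: rest).getD j 0) :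
    ∀ i, ¬ pvGood (a :: rest) n i j := by
  intro i hgi
  obtain ⟨hij, _, hsum⟩ := hgi
  have hjr : j ≤ rest.length := by simpa using Nat.lt_succ_iff.mp (by simpa using hjl)
  apply hg
  calc (pvMins a rest).getD (j-1) 0 ≤ (pvMins a rest).getD i 0 :=
        pvMins_anti rest a i (j-1) (by omega) (by omega)
    _ ≤ (a :: rest).getD i 0 := pvMins_le rest a i i (by omega) (le_refl _)
    _ ≤ n - (a :: rest).getD j 0 := by omega

theorem foldB_spec (a : Int) (rest : List Int) (n : Int) :
    ∀ (L : List Nat) (acc : Int), (∀ j ∈ L, 1 ≤ j ∧ j < (a :: rest).length) →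
      acc ≤ L.foldl (fun ans j =>
          if (pvMins a rest).getD (j-1) 0 ≤ n - (a :: rest).getD j 0 then
            if (j : Int) - ((pvBS (pvMins a rest) (n - (a :: rest).getD j 0) 0 (j-1) : Nat) : Int) + 1 > ans
            then (j : Int) - ((pvBS (pvMins a rest) (n - (a :: rest).getD j 0) 0 (j-1) : Nat) : Int) + 1
            else ans
          else ans) acc ∧
      (L.foldl (fun ans j =>
          if (pvMins a rest).getD (j-1) 0 ≤ n - (a :: rest).getD j 0 then
            if (j : Int) - ((pvBS (pvMins a rest) (n - (a :: rest).getD j 0) 0 (j-1) : Nat) : Int) + 1 > ans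
            then (j : Int) - ((pvBS (pvMins a rest) (n - (a :: rest).getD j 0) 0 (j-1) : Nat) : Int) + 1
            else ans
          else ans) acc = acc ∨
        ∃ i j, pvGood (a :: rest) n i j ∧
          L.foldl (fun ans j =>
            if (pvMins a rest).getD (j-1) 0 ≤ n - (a :: rest).getD j 0 then
              if (j : Int) - ((pvBS (pvMins a rest) (n - (a :: rest).getD j 0) 0 (j-1) : Nat) : Int) + 1 > ans
              then (j : Int) - ((pvBS (pvMins a rest) (n - (a :: rest).getD j 0) 0 (j-1) : Nat) : Int) + 1
              else ans
            else ans) acc = pvSp i j) ∧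
      ∀ j ∈ L, ∀ i, pvGood (a :: rest) n i j →
        pvSp i j ≤ L.foldl (fun ans j =>
          if (pvMins a rest).getD (j-1) 0 ≤ n - (a :: rest).getD j 0 then
            if (j : Int) - ((pvBS (pvMins a rest) (n - (a :: rest).getD j 0) 0 (j-1) : Nat) : Int) + 1 > ans
            then (j : Int) - ((pvBS (pvMins a rest) (n - (a :: rest).getD j 0) 0 (j-1) : Nat) : Int) + 1
            else ans
          else ans) acc := by
  intro L
  induction L with
  | nil => intro acc _; exact ⟨le_refl _, Or.inl rfl, by simp⟩
  | cons x L ih =>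
    intro acc hmem
    obtain ⟨hx1, hxl⟩ := hmem x List.mem_cons_self
    simp only [List.foldl_cons]
    by_cases hgd : (pvMins a rest).getD (x-1) 0 ≤ n - (a :: rest).getD x 0
    · obtain ⟨hGood, hBest⟩ := pvAtJ a rest n x hx1 hxl hgd
      set lo := pvBS (pvMins a rest) (n - (a :: rest).getD x 0) 0 (x-1) with hlodef
      simp only [if_pos hgd]
      by_cases hup : (x : Int) - ((lo : Nat) : Int) + 1 > acc
      · simp only [if_pos hup]
        obtain ⟨h1, h2, h3⟩ := ih ((x : Int) - ((lo : Nat) : Int) + 1)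
          (fun j hj => hmem j (List.mem_cons_of_mem _ hj))
        refine ⟨le_trans (le_of_lt hup) h1, ?_, ?_⟩
        · rcases h2 with h | ⟨i, j, hg, he⟩
          · exact Or.inr ⟨lo, x, hGood, by rw [h]; rfl⟩
          · exact Or.inr ⟨i, j, hg, he⟩
        · intro j hj i hgi
          rcases List.mem_cons.mp hj with rfl | hj
          · have : lo ≤ i := hBest i hgi
            calc pvSp i j ≤ (j : Int) - ((lo : Nat) : Int) + 1 := by
                  simp only [pvSp]; omega
              _ ≤ _ := h1
          · exact h3 j hj i hgi
      · simp only [if_neg hup]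
        obtain ⟨h1, h2, h3⟩ := ih acc (fun j hj => hmem j (List.mem_cons_of_mem _ hj))
        refine ⟨h1, ?_, ?_⟩
        · rcases h2 with h | ⟨i, j, hg, he⟩
          · exact Or.inl h
          · exact Or.inr ⟨i, j, hg, he⟩
        · intro j hj i hgi
          rcases List.mem_cons.mp hj with rfl | hj
          · have : lo ≤ i := hBest i hgi
            calc pvSp i j ≤ (j : Int) - ((lo : Nat) : Int) + 1 := by
                  simp only [pvSp]; omega
              _ ≤ acc := by omega
              _ ≤ _ := h1
          · exact h3 j hj i hgi
    · simp only [if_neg hgd]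
      obtain ⟨h1, h2, h3⟩ := ih acc (fun j hj => hmem j (List.mem_cons_of_mem _ hj))
      refine ⟨h1, ?_, ?_⟩
      · rcases h2 with h | ⟨i, j, hg, he⟩
        · exact Or.inl h
        · exact Or.inr ⟨i, j, hg, he⟩
      · intro j hj i hgi
        rcases List.mem_cons.mp hj with rfl | hj
        · exact absurd hgi (pvNoPair a rest n j hxl hgd i)
        · exact h3 j hj i hgi

theorem f_alt_isMax (arr : List Int) (n : Int) : pvIsMax arr n (f_alt arr n) := by
  match arr with
  | [] =>
    refine ⟨le_refl _, Or.inl rfl, ?_⟩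
    intro i j hg
    obtain ⟨_, hj, _⟩ := hg
    simp at hj
  | a :: rest =>
    obtain ⟨h1, h2, h3⟩ := foldB_spec a rest n (List.range' 1 rest.length) 0
      (fun j hj => by
        have := List.mem_range'_1.mp hj
        constructor
        · omega
        · simp; omega)
    refine ⟨h1, ?_, ?_⟩
    · rcases h2 with h | ⟨i, j, hg, he⟩
      · exact Or.inl h
      · exact Or.inr ⟨i, j, hg, he⟩
    · intro i j hg
      obtain ⟨hij, hjl, hsum⟩ := hg
      have hjm : j ∈ List.range' 1 rest.length := by
        apply List.mem_range'_1.mpr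
        have : j < rest.length + 1 := by simpa using hjl
        omega
      exact h3 j hjm i ⟨hij, hjl, hsum⟩

-- ===== VERDICT (by name: the statement is the Claim_ definition above) =====
theorem f_spec : Claim_equal_f := by
  intro arr n _
  unfold Spec_f
  exact pvIsMax_unique arr n (f arr n) (f_alt arr n) (f_isMax arr n) (f_alt_isMax arr n)
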